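-- pv_equiv track=rewrite | github.com/VIDA-NYU/tim-reasoning | tim_reasoning/reasoning/recipe_tagger.py | extract_action_relations
-- ===== SOURCE A (Python) =====
-- import string
--
-- punctuation_marks = string.punctuation
--
-- def extract_action_relations(tokens, tags):
--     action_relations = []
--     action = None
--     action_used = False
--
--     for token, tag in zip(tokens, tags):
--         if tag == 'ACTION':
--             if not action_used and action is not None:
--                 action_relations.append((action, None))
--             action = token
--             action_used = False
--         elif tag in {'INGREDIENT', 'TOOL'}:
--             object = token.rstrip(punctuation_marks)
--             if action is not None:
--                 action_relations.append((action, object))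
--                 action_used = True
--
--     if not action_used and action is not None:
--         action_relations.append((action, None))
--
--     return action_relations
-- ===== SOURCE B (Python) =====
-- import string
--
-- punctuation_marks = string.punctuation
--
-- def extract_action_relations(tokens, tags):
--     # Phase 1: group tokens into (action, [objects]) groups.
--     groups = []
--     for token, tag in zip(tokens, tags):
--         if tag == 'ACTION':
--             groups.append((token, []))
--         elif tag in ('INGREDIENT', 'TOOL') and groups:
--             groups[-1][1].append(token.rstrip(punctuation_marks))
--     # Phase 2: flatten; a group with no objects yields (action, None).
--     out = []
--     for action, objs in groups:
--         if objs:
--             out.extend((action, o) for o in objs)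
--         else:
--             out.append((action, None))
--     return out
-- ===== Notes on version B (the rewrite author's own statement) =====
-- stated objective: simpler
-- what changed: Replaced the single scan with an action_used flag and duplicated end/mid-loop flush by a two-phase decomposition: first build (action, objects) groups, then flatten each group with a uniform empty-check.
import Mathlib
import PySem

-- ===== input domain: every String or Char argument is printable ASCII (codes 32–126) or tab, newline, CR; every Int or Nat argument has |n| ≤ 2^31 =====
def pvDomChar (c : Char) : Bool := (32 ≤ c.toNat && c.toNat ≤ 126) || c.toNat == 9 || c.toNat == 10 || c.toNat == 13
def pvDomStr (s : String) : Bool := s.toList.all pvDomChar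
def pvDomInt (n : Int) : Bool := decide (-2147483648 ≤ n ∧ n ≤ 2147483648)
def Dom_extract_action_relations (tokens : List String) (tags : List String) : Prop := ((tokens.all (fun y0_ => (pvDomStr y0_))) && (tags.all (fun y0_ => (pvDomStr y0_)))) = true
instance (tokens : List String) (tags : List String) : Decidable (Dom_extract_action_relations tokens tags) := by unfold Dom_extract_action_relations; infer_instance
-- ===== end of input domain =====

-- B replaces A's flag-and-flush scan with a two-phase group-then-flatten decomposition (same cost, simpler).

-- shared helper: token.rstrip(string.punctuation), exact on the ASCII domain
def pvPunct : List Char := "!\"#$%&'()*+,-./:;<=>?@[\\]^_`{|}~".toList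
def pvRstrip (s : String) : String :=
  String.ofList ((s.toList.reverse.dropWhile (fun c => pvPunct.contains c)).reverse)

-- ===== PORT A =====
def pvStepA (st : List (String × Option String) × Option String × Bool) (tt : String × String) :
    List (String × Option String) × Option String × Bool :=
  if tt.2 = "ACTION" then
    let acc1 := match st.2.1, st.2.2 with
      | some a, false => st.1 ++ [(a, none)]
      | _, _ => st.1
    (acc1, some tt.1, false)
  else if tt.2 = "INGREDIENT" ∨ tt.2 = "TOOL" then
    match st.2.1 with
    | some a => (st.1 ++ [(a, some (pvRstrip tt.1))], some a, true)
    | none => st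
  else st

def pvFin (st : List (String × Option String) × Option String × Bool) : List (String × Option String) :=
  match st with
  | (acc, some a, false) => acc ++ [(a, none)]
  | (acc, _, _) => acc

def extract_action_relations (tokens : List String) (tags : List String) : List (String × Option String) :=
  pvFin ((tokens.zip tags).foldl pvStepA ([], none, false))

-- ===== PORT B =====
def pvStepG (groups : List (String × List String)) (tt : String × String) : List (String × List String) :=
  if tt.2 = "ACTION" then groups ++ [(tt.1, [])]
  else if (tt.2 = "INGREDIENT" ∨ tt.2 = "TOOL") ∧ groups ≠ [] then
    match groups.getLast? with
    | some g => groups.dropLast ++ [(g.1, g.2 ++ [pvRstrip tt.1])]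
    | none => groups
  else groups

def pvFlatten (groups : List (String × List String)) : List (String × Option String) :=
  groups.flatMap (fun g => if g.2 = [] then [(g.1, none)] else g.2.map (fun o => (g.1, some o)))

def extract_action_relations_alt (tokens : List String) (tags : List String) : List (String × Option String) :=
  pvFlatten ((tokens.zip tags).foldl pvStepG [])

-- ===== PRECONDITION & SPEC =====
def Spec_extract_action_relations (tokens : List String) (tags : List String) (out : List (String × Option String)) : Prop := out = extract_action_relations_alt tokens tags
instance (tokens : List String) (tags : List String) (out : List (String × Option String)) : Decidable (Spec_extract_action_relations tokens tags out) := by unfold Spec_extract_action_relations; infer_instance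

-- ===== CLAIM (what is proved, stated in full; the proofs are below) =====
def Claim_equal_extract_action_relations : Prop := ∀ (tokens : List String) (tags : List String), Dom_extract_action_relations tokens tags → Spec_extract_action_relations tokens tags (extract_action_relations tokens tags)

-- ===== LEMMAS AND PROOFS =====

-- B's step only touches the last group: context splits off.
theorem pvStepG_append (gs hs : List (String × List String)) (p : String × String) (h : hs ≠ []) :
    pvStepG (gs ++ hs) p = gs ++ pvStepG hs p ∧ pvStepG hs p ≠ [] := by
  obtain ⟨hs', g, rfl⟩ : ∃ hs' g, hs = hs' ++ [g] :=
    ⟨hs.dropLast, hs.getLast h, (List.dropLast_append_getLast h).symm⟩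
  by_cases h1 : p.2 = "ACTION"
  · constructor
    · simp [pvStepG, h1, List.append_assoc]
    · simp [pvStepG, h1]
  · by_cases h2 : p.2 = "INGREDIENT" ∨ p.2 = "TOOL"
    · constructor
      · simp [pvStepG, h1, h2, h, List.append_assoc]
      · simp [pvStepG, h1, h2]
    · constructor
      · simp [pvStepG, h1, h2]
      · simp [pvStepG, h1, h2]

theorem pvLoopG_append (l : List (String × String)) (gs : List (String × List String)) :
    ∀ hs, hs ≠ [] → l.foldl pvStepG (gs ++ hs) = gs ++ l.foldl pvStepG hs := by
  induction l with
  | nil => intro hs h; simp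
  | cons p l ih =>
    intro hs h
    obtain ⟨h1, h2⟩ := pvStepG_append gs hs p h
    simp only [List.foldl_cons, h1]
    exact ih _ h2

-- main invariant: A's state (acc ++ current objects as pairs, some a, objs ≠ []) ↔ B's single open group
theorem pvMain (l : List (String × String)) :
    ∀ (a : String) (objs : List String) (acc : List (String × Option String)),
    pvFin (l.foldl pvStepA (acc ++ objs.map (fun o => (a, some o)), some a, !objs.isEmpty))
      = acc ++ pvFlatten (l.foldl pvStepG [(a, objs)]) := by
  induction l with
  | nil =>
    intro a objs acc
    cases objs with
    | nil => simp [pvFin, pvFlatten]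
    | cons o os => simp [pvFin, pvFlatten]
  | cons p l ih =>
    intro a objs acc
    simp only [List.foldl_cons]
    by_cases hA : p.2 = "ACTION"
    · have hstep : pvStepA (acc ++ objs.map (fun o => (a, some o)), some a, !objs.isEmpty) p
          = ((acc ++ pvFlatten [(a, objs)]), some p.1, false) := by
        cases objs with
        | nil => simp [pvStepA, hA, pvFlatten]
        | cons o os => simp [pvStepA, hA, pvFlatten]
      have hstepG : pvStepG [(a, objs)] p = [(a, objs)] ++ [(p.1, [])] := by
        simp [pvStepG, hA]
      rw [hstep, hstepG, pvLoopG_append l [(a, objs)] [(p.1, [])] (by simp)]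
      have := ih p.1 [] (acc ++ pvFlatten [(a, objs)])
      simp only [List.map_nil, List.append_nil, List.isEmpty_nil, Bool.not_true] at this
      rw [this, pvFlatten]
      simp [pvFlatten, List.append_assoc]
    · by_cases hO : p.2 = "INGREDIENT" ∨ p.2 = "TOOL"
      · have hstep : pvStepA (acc ++ objs.map (fun o => (a, some o)), some a, !objs.isEmpty) p
            = (acc ++ (objs ++ [pvRstrip p.1]).map (fun o => (a, some o)), some a,
               !(objs ++ [pvRstrip p.1]).isEmpty) := by
          simp [pvStepA, hA, hO]
        have hstepG : pvStepG [(a, objs)] p = [(a, objs ++ [pvRstrip p.1])] := by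
          simp [pvStepG, hA, hO]
        rw [hstep, hstepG, ih]
      · have hstep : pvStepA (acc ++ objs.map (fun o => (a, some o)), some a, !objs.isEmpty) p
            = (acc ++ objs.map (fun o => (a, some o)), some a, !objs.isEmpty) := by
          simp [pvStepA, hA, hO]
        have hstepG : pvStepG [(a, objs)] p = [(a, objs)] := by
          simp [pvStepG, hA, hO]
        rw [hstep, hstepG, ih]

-- before the first ACTION both sides carry the empty state
theorem pvBase (l : List (String × String)) :
    pvFin (l.foldl pvStepA ([], none, false)) = pvFlatten (l.foldl pvStepG []) := by
  induction l with
  | nil => simp [pvFin, pvFlatten]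
  | cons p l ih =>
    simp only [List.foldl_cons]
    by_cases hA : p.2 = "ACTION"
    · have h1 : pvStepA ([], none, false) p = ([], some p.1, false) := by
        simp [pvStepA, hA]
      have h2 : pvStepG [] p = [(p.1, [])] := by simp [pvStepG, hA]
      rw [h1, h2]
      have := pvMain l p.1 [] []
      simpa using this
    · have h1 : pvStepA ([], none, false) p = ([], none, false) := by
        simp [pvStepA, hA]
      have h2 : pvStepG [] p = [] := by simp [pvStepG, hA]
      rw [h1, h2]; exact ih

-- ===== VERDICT (by name: the statement is the Claim_ definition above) =====
theorem extract_action_relations_spec : Claim_equal_extract_action_relations := by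
  intro tokens tags _
  unfold Spec_extract_action_relations extract_action_relations extract_action_relations_alt
  exact pvBase (tokens.zip tags)
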